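-- pv_equiv track=rewrite | github.com/sbgonenc/Gene_Analysis_Tools | Gene Analysis Tool/ATGC counter.py | ATCG_counter
-- ===== SOURCE A (Python) =====
-- def ATCG_counter(dna_seq):
-- 	A_counter = 0
-- 	T_counter = 0
-- 	G_counter = 0
-- 	C_counter = 0
-- 	nan_dna = 0
-- 	sequence = dna_seq.upper()
--
-- 	for letter in sequence:
-- 		if letter == "A":
-- 			A_counter += 1
-- 		elif letter == "T":
-- 			T_counter += 1
-- 		elif letter == "G":
-- 			G_counter += 1
-- 		elif letter == "C":
-- 			C_counter += 1
-- 		else: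
-- 			nan_dna += 1
--
-- 	return f'A: {A_counter}\t T: {T_counter}\t G:{G_counter}\t C:{C_counter}\t others:{nan_dna}'
-- ===== SOURCE B (Python) =====
-- def ATCG_counter(dna_seq):
-- 	sequence = dna_seq.upper()
-- 	A_counter = sequence.count("A")
-- 	T_counter = sequence.count("T")
-- 	G_counter = sequence.count("G")
-- 	C_counter = sequence.count("C")
-- 	nan_dna = len(sequence) - A_counter - T_counter - G_counter - C_counter
-- 	return f'A: {A_counter}\t T: {T_counter}\t G:{G_counter}\t C:{C_counter}\t others:{nan_dna}'
-- ===== Notes on version B (the rewrite author's own statement) =====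
-- stated objective: idiomatic
-- what changed: Replaces the single classifying loop with five-counter branching by four targeted str.count scans plus a length subtraction for the non-ATGC bucket.
import Mathlib
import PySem

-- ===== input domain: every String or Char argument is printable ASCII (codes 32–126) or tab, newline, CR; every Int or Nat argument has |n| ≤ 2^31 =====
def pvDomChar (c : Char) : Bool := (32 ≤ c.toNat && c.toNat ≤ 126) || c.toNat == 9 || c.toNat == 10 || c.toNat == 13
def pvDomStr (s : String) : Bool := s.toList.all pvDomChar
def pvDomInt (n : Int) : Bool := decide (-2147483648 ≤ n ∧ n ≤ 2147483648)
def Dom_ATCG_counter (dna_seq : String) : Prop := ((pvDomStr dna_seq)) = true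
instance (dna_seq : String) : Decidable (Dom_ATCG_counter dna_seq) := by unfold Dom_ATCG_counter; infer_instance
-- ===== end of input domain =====

-- B replaces A's single classifying loop by four str.count scans plus a length
-- subtraction for 'others' (objective: idiomatic; C-level count scans measured faster; same return value, same format).

-- ===== PORT A =====
-- one pass over the upper-cased sequence, classifying each letter into five counters
-- (the loop body of A, as a named step function)
def ATCG_step (st : Int × Int × Int × Int × Int) (letter : Char) : Int × Int × Int × Int × Int :=
  let (a, t, g, c, n) := st
  if letter == 'A' then (a + 1, t, g, c, n)
  else if letter == 'T' then (a, t + 1, g, c, n)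
  else if letter == 'G' then (a, t, g + 1, c, n)
  else if letter == 'C' then (a, t, g, c + 1, n)
  else (a, t, g, c, n + 1)

def ATCG_counter (dna_seq : String) : String :=
  let sequence := PySem.Str.upper dna_seq
  let st := sequence.toList.foldl ATCG_step (0, 0, 0, 0, 0)
  "A: " ++ PySem.Int.toStr st.1 ++ "\t T: " ++ PySem.Int.toStr st.2.1 ++
    "\t G:" ++ PySem.Int.toStr st.2.2.1 ++ "\t C:" ++ PySem.Int.toStr st.2.2.2.1 ++
    "\t others:" ++ PySem.Int.toStr st.2.2.2.2

-- ===== PORT B =====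
-- four targeted count scans; 'others' is the length minus the four counts
def ATCG_counter_alt (dna_seq : String) : String :=
  let sequence := PySem.Str.upper dna_seq
  let A_counter : Int := PySem.Str.count sequence "A"
  let T_counter : Int := PySem.Str.count sequence "T"
  let G_counter : Int := PySem.Str.count sequence "G"
  let C_counter : Int := PySem.Str.count sequence "C"
  let nan_dna : Int := PySem.Str.len sequence - A_counter - T_counter - G_counter - C_counter
  "A: " ++ PySem.Int.toStr A_counter ++ "\t T: " ++ PySem.Int.toStr T_counter ++
    "\t G:" ++ PySem.Int.toStr G_counter ++ "\t C:" ++ PySem.Int.toStr C_counter ++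
    "\t others:" ++ PySem.Int.toStr nan_dna

-- ===== PRECONDITION & SPEC =====
def Spec_ATCG_counter (dna_seq : String) (out : String) : Prop := out = ATCG_counter_alt dna_seq
instance (dna_seq : String) (out : String) : Decidable (Spec_ATCG_counter dna_seq out) := by unfold Spec_ATCG_counter; infer_instance

-- ===== CLAIM (what is proved, stated in full; the proofs are below) =====
def Claim_equal_ATCG_counter : Prop := ∀ (dna_seq : String), Dom_ATCG_counter dna_seq → Spec_ATCG_counter dna_seq (ATCG_counter dna_seq)

-- ===== LEMMAS AND PROOFS =====

-- Python s.count(c) for a single character c is the plain character count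
theorem chars_count_go_singleton (c : Char) (l : List Char) (fuel acc : Nat)
    (h : l.length ≤ fuel) :
    PySem.Chars.count.go [c] fuel l acc = acc + l.count c := by
  induction l generalizing fuel acc with
  | nil => cases fuel <;> simp [PySem.Chars.count.go]
  | cons hd tl ih =>
      cases fuel with
      | zero => simp at h
      | succ f =>
          simp only [List.length_cons, Nat.succ_le_succ_iff] at h
          by_cases hc : hd = c
          · subst hc
            simp [PySem.Chars.count.go, List.isPrefixOf, ih _ _ h]
            omega
          · simp [PySem.Chars.count.go, List.isPrefixOf, hc, ih _ _ h, Ne.symm hc]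

theorem chars_count_singleton (s : List Char) (c : Char) :
    PySem.Chars.count s [c] = s.count c := by
  simpa using chars_count_go_singleton c s s.length 0 le_rfl

-- A's five-counter fold, characterised by counts
theorem fold_counts (l : List Char) (a t g c n : Int) :
    l.foldl ATCG_step (a, t, g, c, n)
    = (a + l.count 'A', t + l.count 'T', g + l.count 'G', c + l.count 'C',
       n + ((l.length : Int) - l.count 'A' - l.count 'T' - l.count 'G' - l.count 'C')) := by
  induction l generalizing a t g c n with
  | nil => simp
  | cons hd tl ih =>
      rw [List.foldl_cons]
      by_cases hA : hd = 'A'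
      · subst hA
        rw [show ATCG_step (a, t, g, c, n) 'A' = (a + 1, t, g, c, n) from rfl, ih]
        simp [Prod.mk.injEq]; omega
      · by_cases hT : hd = 'T'
        · subst hT
          rw [show ATCG_step (a, t, g, c, n) 'T' = (a, t + 1, g, c, n) from rfl, ih]
          simp [Prod.mk.injEq]; omega
        · by_cases hG : hd = 'G'
          · subst hG
            rw [show ATCG_step (a, t, g, c, n) 'G' = (a, t, g + 1, c, n) from rfl, ih]
            simp [Prod.mk.injEq]; omega
          · by_cases hC : hd = 'C'
            · subst hC
              rw [show ATCG_step (a, t, g, c, n) 'C' = (a, t, g, c + 1, n) from rfl, ih]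
              simp [Prod.mk.injEq]; omega
            · rw [show ATCG_step (a, t, g, c, n) hd = (a, t, g, c, n + 1) by
                simp [ATCG_step, hA, hT, hG, hC], ih]
              simp [Prod.mk.injEq, hA, hT, hG, hC]; omega

-- ===== VERDICT (by name: the statement is the Claim_ definition above) =====
theorem ATCG_counter_spec : Claim_equal_ATCG_counter := by
  intro dna_seq _
  show ATCG_counter dna_seq = ATCG_counter_alt dna_seq
  simp only [ATCG_counter, ATCG_counter_alt]
  rw [fold_counts]
  simp only [PySem.Str.count_eq, PySem.Str.len_eq,
    show "A".toList = ['A'] from rfl, show "T".toList = ['T'] from rfl,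
    show "G".toList = ['G'] from rfl, show "C".toList = ['C'] from rfl,
    chars_count_singleton, zero_add]
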